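-- pv_equiv track=rewrite | github.com/aramiracle/piano_generator | dataset.py | _create_event_mapping
-- ===== SOURCE A (Python) =====
-- from collections import defaultdict
--
-- def _create_event_mapping(sequences):
--     """
--     Create a mapping from event string to integer index.
--
--     Args:
--         sequences (list): A list of event sequences.
--
--     Returns:
--         dict: A dictionary mapping event strings to integers.
--     """
--     event_to_idx = defaultdict(lambda: len(event_to_idx))
--
--     # Add start and end tokens
--     event_to_idx['<start>'] = 0
--     event_to_idx['<end>'] = 1
--
--     # Iterate through all sequences and add all event strings to the mapping
--     for seq in sequences:
--         for event in seq:
--             event_to_idx[event]  # Access to populate defaultdict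
--
--     return dict(event_to_idx)
-- ===== SOURCE B (Python) =====
-- def _create_event_mapping(sequences):
--     """Sort the distinct events by the position of their first occurrence
--     (computed with a backward overwrite scan) and number them from 2."""
--     events = [e for seq in sequences for e in seq]
--     firsts = {}
--     for i, e in reversed(list(enumerate(events))):
--         firsts[e] = i  # backward: the last write is the first occurrence
--     keys = sorted((e for e in firsts if e not in ('<start>', '<end>')),
--                   key=firsts.get)
--     mapping = {'<start>': 0, '<end>': 1}
--     for i, e in enumerate(keys, 2):
--         mapping[e] = i
--     return mapping
-- ===== Notes on version B (the rewrite author's own statement) =====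
-- stated objective: alternative
-- what changed: Replaces A's single-pass defaultdict-with-len id accumulator by a sort-by-first-occurrence algorithm: a backward overwrite scan records each event's first-occurrence position, the distinct non-token events are sorted by that position, and ids are assigned from 2 by enumeration.
import Mathlib
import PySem

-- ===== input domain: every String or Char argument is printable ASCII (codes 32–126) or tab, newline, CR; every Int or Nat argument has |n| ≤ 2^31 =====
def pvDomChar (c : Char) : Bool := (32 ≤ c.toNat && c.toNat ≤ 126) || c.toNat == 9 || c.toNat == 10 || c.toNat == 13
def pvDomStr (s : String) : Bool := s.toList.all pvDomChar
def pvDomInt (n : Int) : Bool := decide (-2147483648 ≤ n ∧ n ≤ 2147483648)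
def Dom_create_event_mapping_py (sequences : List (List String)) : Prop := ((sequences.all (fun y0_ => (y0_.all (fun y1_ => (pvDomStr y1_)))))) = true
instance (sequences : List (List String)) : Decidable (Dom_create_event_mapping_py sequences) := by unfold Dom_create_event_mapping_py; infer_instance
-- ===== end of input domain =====

-- B replaces A's single-pass defaultdict-with-len id accumulation by a different algorithm:
-- a backward overwrite scan records each event's first-occurrence position, the distinct
-- non-token events are sorted by that position, and ids are assigned from 2 by enumeration.

-- ===== PORT A =====
-- defaultdict(lambda: len(d)): accessing a missing key inserts it with the current size.
def create_event_mapping_py (sequences : List (List String)) : List (String × Int) :=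
  let d0 : PySem.Dict String Int :=
    (PySem.Dict.empty.insert "<start>" 0).insert "<end>" 1
  let d := sequences.foldl (fun d seq =>
    seq.foldl (fun d event =>
      if d.contains event then d else d.insert event (d.size : Int)) d) d0
  d.items

-- ===== PORT B =====
def create_event_mapping_py_alt (sequences : List (List String)) : List (String × Int) :=
  -- events = [e for seq in sequences for e in seq]
  let events : List String := sequences.flatMap (fun seq => seq)
  -- for i, e in reversed(list(enumerate(events))): firsts[e] = i
  let firsts : PySem.Dict String Int :=
    ((PySem.List.enumerate events 0).reverse).foldl
      (fun d p => d.insert p.2 p.1) PySem.Dict.empty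
  -- keys = sorted((e for e in firsts if e not in ('<start>', '<end>')), key=firsts.get)
  -- firsts.get e is ported as getD e 0: exact, since every key iterated over is in firsts.
  let keys : List String :=
    PySem.List.sorted (firsts.keys.filter (fun e => !(e == "<start>" || e == "<end>")))
      (fun e => firsts.getD e 0) false
  -- mapping = {'<start>': 0, '<end>': 1}; for i, e in enumerate(keys, 2): mapping[e] = i
  let mapping : PySem.Dict String Int :=
    (PySem.Dict.empty.insert "<start>" 0).insert "<end>" 1
  ((PySem.List.enumerate keys 2).foldl (fun d p => d.insert p.2 p.1) mapping).items

-- ===== PRECONDITION & SPEC =====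
def Spec_create_event_mapping_py (sequences : List (List String)) (out : List (String × Int)) : Prop := out = create_event_mapping_py_alt sequences
instance (sequences : List (List String)) (out : List (String × Int)) : Decidable (Spec_create_event_mapping_py sequences out) := by unfold Spec_create_event_mapping_py; infer_instance

-- ===== CLAIM (what is proved, stated in full; the proofs are below) =====
def Claim_equal_create_event_mapping_py : Prop := ∀ (sequences : List (List String)), Dom_create_event_mapping_py sequences → Spec_create_event_mapping_py sequences (create_event_mapping_py sequences)

-- ===== LEMMAS AND PROOFS =====

-- the first-occurrence index of a member, as a total Nat function (proof-side only)
def fIdx (xs : List String) (e : String) : Nat := (PySem.List.index? xs e).getD 0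

lemma filter_discard (s : List String) (e : String) (p : String → Bool) (hp : p e = false) :
    List.filter p (PySem.Set.discard s e) = List.filter p s := by
  have hdisc : PySem.Set.discard s e = List.filter (fun y => !(y == e)) s := rfl
  rw [hdisc, List.filter_filter]
  congr 1
  funext y
  by_cases h : y = e
  · subst h; simp [hp]
  · simp [h]

-- A's accumulation loop, characterised: it appends the fresh events of xs (first
-- occurrences, in order) to d, numbered consecutively from d.size.
lemma core_foldl (xs : List String) (d : PySem.Dict String Int) :
    (xs.foldl (fun d e => if d.contains e then d else d.insert e (d.size : Int)) d).items
      = d.items ++ (PySem.List.enumerate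
          ((PySem.List.dedup xs).filter (fun e => !(d.contains e))) (d.size : Int)).map
          (fun p => (p.2, p.1)) := by
  induction xs generalizing d with
  | nil => simp [PySem.List.dedup]
  | cons e xs ih =>
    simp only [PySem.List.dedup_eq_ofList] at ih ⊢
    simp only [List.foldl_cons, PySem.Set.ofList_cons]
    by_cases hc : d.contains e = true
    · rw [if_pos hc, ih d]
      congr 2
      rw [List.filter_cons_of_neg (by simp [hc]), filter_discard _ _ _ (by simp [hc])]
    · rw [if_neg hc, ih]
      have hc' : d.contains e = false := by simpa using hc
      rw [PySem.Dict.items_insert_of_not_contains d _ hc']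
      have hsz : (d.insert e (d.size : Int)).size = d.size + 1 := by
        rw [PySem.Dict.size_insert]; simp [hc']
      have hfun2 : (fun y => !(d.insert e (d.size : Int)).contains y)
          = (fun y : String => (!d.contains y) && !(y == e)) := by
        funext y
        rw [PySem.Dict.contains_insert]
        cases heq : y == e <;> simp
      have hfilt : ((PySem.Set.ofList xs : List String).filter
            (fun y => !(d.insert e (d.size : Int)).contains y))
          = ((PySem.Set.ofList xs).discard e).filter (fun y => !d.contains y) := by
        have hdisc : PySem.Set.discard (PySem.Set.ofList xs) e
            = List.filter (fun y => !(y == e)) (PySem.Set.ofList xs) := rfl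
        rw [hdisc, List.filter_filter, ← hfun2]
      rw [hsz, hfilt, List.filter_cons_of_pos (by simp [hc']), PySem.List.enumerate_cons]
      push_cast
      simp [List.append_assoc]

-- the initial dict {'<start>': 0, '<end>': 1}
lemma d0_size :
    ((PySem.Dict.empty.insert "<start>" (0 : Int)).insert "<end>" 1).size = 2 := by decide

lemma d0_contains (y : String) :
    ((PySem.Dict.empty.insert "<start>" (0 : Int)).insert "<end>" 1).contains y
      = (y == "<start>" || y == "<end>") := by
  rw [PySem.Dict.contains_insert, PySem.Dict.contains_insert]
  simp [Bool.or_comm]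

-- find? over enumerate: the first pair whose element is e carries e's first index.
lemma find?_enumerate (xs : List String) (s : Int) (e : String) :
    (PySem.List.enumerate xs s).find? (fun p => p.2 == e)
      = (PySem.List.index? xs e).map (fun k : Nat => ((s + (k : Int), e) : Int × String)) := by
  induction xs generalizing s with
  | nil => simp [PySem.List.enumerate_nil]
  | cons x xs ih =>
    by_cases hx : x = e
    · subst hx
      rw [PySem.List.enumerate_cons, PySem.List.index?_cons_self]
      simp
    · rw [PySem.List.enumerate_cons, PySem.List.index?_cons_of_ne _ hx,
        List.find?_cons_of_neg (by simp [hx]), ih, Option.map_map]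
      congr 1
      funext k
      simp only [Function.comp]
      push_cast
      ring_nf

-- B's backward overwrite loop: the surviving value at e comes from the FIRST pair for e.
lemma getD_foldl_insert_swap (l : List (Int × String)) (d : PySem.Dict String Int) (e : String) :
    (l.foldl (fun d p => d.insert p.2 p.1) d).getD e 0 =
      match l.reverse.find? (fun p => p.2 == e) with
      | some p => p.1
      | none => d.getD e 0 := by
  induction l generalizing d with
  | nil => simp
  | cons x l ih =>
    rw [List.foldl_cons, ih, List.reverse_cons, List.find?_append]
    cases h : l.reverse.find? (fun p => p.2 == e) with
    | some p => simp
    | none =>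
      by_cases hx : x.2 = e
      · subst hx
        simp [List.find?, PySem.Dict.getD_insert_self]
      · have hb : ((fun p : Int × String => p.2 == e) x) = false := by simp [hx]
        simp only [Option.or, List.find?, hb]
        rw [PySem.Dict.getD_insert_of_ne d x.1 0 (Ne.symm hx)]

-- the ordered dedup of xs is strictly increasing in first-occurrence index
lemma pairwise_fIdx (xs : List String) :
    (PySem.Set.ofList xs).Pairwise (fun a b => fIdx xs a < fIdx xs b) := by
  induction xs with
  | nil => simp [PySem.Set.ofList_nil]
  | cons x xs ih =>
    rw [PySem.Set.ofList_cons]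
    constructor
    · intro b hb
      obtain ⟨hbs, hbx⟩ := (PySem.Set.mem_discard _ _ _).mp hb
      have hbxs : b ∈ xs := (PySem.Set.mem_ofList _ _).mp hbs
      obtain ⟨k, hk⟩ := Option.isSome_iff_exists.mp
        ((PySem.List.index?_isSome_iff _ _).mpr hbxs)
      unfold fIdx
      rw [PySem.List.index?_cons_self, PySem.List.index?_cons_of_ne _ (Ne.symm hbx), hk]
      simp
    · have hsub : PySem.Set.discard (PySem.Set.ofList xs) x
          = (PySem.Set.ofList xs).filter (fun y => !(y == x)) := rfl
      rw [hsub]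
      refine List.Pairwise.imp_of_mem ?_ (List.Pairwise.filter _ ih)
      intro a b ha hb hlt
      have hax : a ≠ x := by simpa using (List.of_mem_filter ha)
      have hbx : b ≠ x := by simpa using (List.of_mem_filter hb)
      unfold fIdx at hlt ⊢
      rw [PySem.List.index?_cons_of_ne _ (Ne.symm hax),
        PySem.List.index?_cons_of_ne _ (Ne.symm hbx)]
      cases ha' : PySem.List.index? xs a <;> cases hb' : PySem.List.index? xs b <;>
        rw [ha', hb'] at hlt <;> simp at hlt ⊢ <;> try omega

-- ===== VERDICT (by name: the statement is the Claim_ definition above) =====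
theorem create_event_mapping_py_spec : Claim_equal_create_event_mapping_py := by
  intro sequences _
  unfold Spec_create_event_mapping_py create_event_mapping_py create_event_mapping_py_alt
  dsimp only
  set d0 : PySem.Dict String Int :=
    (PySem.Dict.empty.insert "<start>" 0).insert "<end>" 1 with hd0
  set events : List String := sequences.flatMap (fun seq => seq) with hevents
  set firsts : PySem.Dict String Int :=
    ((PySem.List.enumerate events 0).reverse).foldl
      (fun d p => d.insert p.2 p.1) PySem.Dict.empty with hfirsts
  -- the key list of the backward scan: the distinct events (as a set)
  have hkeys : firsts.keys = PySem.Set.ofList events.reverse := by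
    rw [hfirsts, PySem.Dict.keys_foldl_insert_key ((PySem.List.enumerate events 0).reverse)
      (fun p => p.2) (fun d p => p.1) PySem.Dict.empty]
    have hmap : ((PySem.List.enumerate events 0).reverse).map (fun p : Int × String => p.2)
        = events.reverse := by
      rw [List.map_reverse, PySem.List.map_snd_enumerate]
    rw [hmap]
    rfl
  -- the surviving value at a member e is e's first-occurrence index
  have hgetD : ∀ e ∈ events, firsts.getD e 0 = ((fIdx events e : Nat) : Int) := by
    intro e he
    obtain ⟨k, hk⟩ := Option.isSome_iff_exists.mp
      ((PySem.List.index?_isSome_iff _ _).mpr he)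
    rw [hfirsts, getD_foldl_insert_swap, List.reverse_reverse, find?_enumerate, hk]
    unfold fIdx
    rw [hk]
    simp
  set pred : String → Bool := fun e => !(e == "<start>" || e == "<end>") with hpred
  set rest : List String := (PySem.Set.ofList events).filter pred with hrest
  -- the sorted key list IS the dedup-order list rest
  have hsorted : PySem.List.sorted (firsts.keys.filter pred)
      (fun e => firsts.getD e 0) false = rest := by
    apply PySem.List.sorted_eq_of_perm_of_pairwise_lt
    · -- rest is a permutation of the filtered key list
      have h1 : rest.Nodup := by
        rw [hrest]
        exact (PySem.Set.nodup_ofList events).filter _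
      have h2 : (firsts.keys.filter pred).Nodup := by
        rw [hkeys]
        exact (PySem.Set.nodup_ofList events.reverse).filter _
      rw [List.perm_ext_iff_of_nodup h1 h2]
      intro a
      rw [hkeys, hrest]
      simp [PySem.Set.mem_ofList]
    · -- rest is strictly increasing in first-occurrence position
      refine List.Pairwise.imp_of_mem ?_ ((pairwise_fIdx events).filter pred)
      intro a b ha hb hlt
      have hae : a ∈ events :=
        (PySem.Set.mem_ofList _ _).mp (List.mem_of_mem_filter ha)
      have hbe : b ∈ events :=
        (PySem.Set.mem_ofList _ _).mp (List.mem_of_mem_filter hb)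
      rw [hgetD a hae, hgetD b hbe]
      exact_mod_cast hlt
  rw [hsorted]
  -- reduce A's loop to a single fold over the flattened events
  have hA : (sequences.foldl (fun d seq =>
      seq.foldl (fun d event =>
        if d.contains event then d else d.insert event (d.size : Int)) d) d0)
      = (sequences.flatten).foldl
        (fun d e => if d.contains e then d else d.insert e (d.size : Int)) d0 := by
    rw [List.foldl_flatten]
  have hflat : events = sequences.flatten := by simp [hevents]
  simp only [hA, ← hflat]
  rw [core_foldl]
  simp only [PySem.List.dedup_eq_ofList]
  have hpred' : (fun y : String => !d0.contains y) = pred := by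
    funext y; rw [hd0, d0_contains, hpred]
  rw [hpred', d0_size, ← hrest]
  -- B's insertion loop over fresh distinct keys appends
  have hnodup : (List.map (fun p : Int × String => p.2)
      (PySem.List.enumerate rest 2)).Nodup := by
    rw [PySem.List.map_snd_enumerate, hrest]
    exact (PySem.Set.nodup_ofList events).filter _
  have hfresh : ∀ p ∈ PySem.List.enumerate rest 2, d0.contains p.2 = false := by
    intro p hp
    have hmem : p.2 ∈ rest := by
      have := congrArg (fun l => p.2 ∈ l) (PySem.List.map_snd_enumerate rest 2)
      simp only [eq_iff_iff] at this
      exact this.mp (List.mem_map_of_mem hp)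
    have hpm := List.of_mem_filter hmem
    rw [hd0, d0_contains]
    simp only [hpred] at hpm
    simpa using hpm
  rw [PySem.Dict.items_foldl_insert_fresh (PySem.List.enumerate rest 2)
    (fun p => p.2) (fun p => p.1) d0 hfresh hnodup]
  rfl
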